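-- pv_equiv track=rewrite | github.com/mborrus/featurefinder | scrapers/amc.py | _determine_special_note
-- ===== SOURCE A (Python) =====
-- def _determine_special_note(text: str, format_info: str) -> str:
--     """Determine if this is a special screening (enhanced detection)"""
--     text_lower = text.lower()
--     notes = []
--
--     # Check for special events (enhanced)
--     if any(keyword in text_lower for keyword in ['q&a', 'q & a', 'q and a']):
--         notes.append('Q&A')
--
--     # Director and filmmaker appearances (enhanced)
--     if any(keyword in text_lower for keyword in ['with director', 'director in person', 'director present']):
--         notes.append('Director Appearance')
--     elif 'director' in text_lower and ('appearance' in text_lower or 'intro' in text_lower or 'in person' in text_lower):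
--         notes.append('Director Appearance')
--
--     if any(keyword in text_lower for keyword in ['with filmmaker', 'filmmaker in person', 'filmmaker present']):
--         notes.append('Filmmaker Appearance')
--     elif 'filmmaker' in text_lower and ('appearance' in text_lower or 'in person' in text_lower):
--         notes.append('Filmmaker Appearance')
--
--     # Premieres and opening nights (enhanced)
--     if 'opening night' in text_lower:
--         notes.append('Opening Night')
--     elif 'premiere' in text_lower:
--         notes.append('Premiere')
--
--     # Preview screenings (enhanced)
--     if any(keyword in text_lower for keyword in ['sneak preview', 'sneak peek']):
--         notes.append('Sneak Preview')
--     elif 'advance screening' in text_lower or 'early access' in text_lower: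
--         notes.append('Advance Screening')
--
--     # Special events
--     if 'special presentation' in text_lower or 'special screening' in text_lower:
--         notes.append('Special Presentation')
--     if 'fan event' in text_lower or 'fan screening' in text_lower:
--         notes.append('Fan Event')
--     if 'marathon' in text_lower or 'double feature' in text_lower or 'triple feature' in text_lower:
--         notes.append('Marathon')
--
--     # Anniversary screenings (new)
--     if any(keyword in text_lower for keyword in ['anniversary', 'th anniversary']):
--         notes.append('Anniversary')
--
--     return ' | '.join(notes)
-- ===== SOURCE B (Python) =====
-- # Table-driven rewrite: rules declared as data; each group's first matching
-- # entry appends its label (groups are independent, entries within a group are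
-- # first-match-wins). An entry (musts, anys, label) matches when every phrase of
-- # musts and at least one phrase of anys occurs in the lowercased text.
-- _RULES = [
--     [([], ['q&a', 'q & a', 'q and a'], 'Q&A')],
--     [([], ['with director', 'director in person', 'director present'], 'Director Appearance'),
--      (['director'], ['appearance', 'intro', 'in person'], 'Director Appearance')],
--     [([], ['with filmmaker', 'filmmaker in person', 'filmmaker present'], 'Filmmaker Appearance'),
--      (['filmmaker'], ['appearance', 'in person'], 'Filmmaker Appearance')],
--     [([], ['opening night'], 'Opening Night'),
--      ([], ['premiere'], 'Premiere')],
--     [([], ['sneak preview', 'sneak peek'], 'Sneak Preview'),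
--      ([], ['advance screening', 'early access'], 'Advance Screening')],
--     [([], ['special presentation', 'special screening'], 'Special Presentation')],
--     [([], ['fan event', 'fan screening'], 'Fan Event')],
--     [([], ['marathon', 'double feature', 'triple feature'], 'Marathon')],
--     [([], ['anniversary', 'th anniversary'], 'Anniversary')],
-- ]
--
--
-- def _determine_special_note(text: str, format_info: str) -> str:
--     t = text.lower()
--     labels = []
--     for group in _RULES:
--         for musts, anys, label in group:
--             if all(m in t for m in musts) and any(a in t for a in anys):
--                 labels.append(label)
--                 break
--     return ' | '.join(labels)
-- ===== Notes on version B (the rewrite author's own statement) =====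
-- stated objective: simpler
-- what changed: Replaces the flat if/elif cascade with a declarative rule table (groups of (musts, anys, label) entries) scanned by one generic first-match-per-group loop.
import Mathlib
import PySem

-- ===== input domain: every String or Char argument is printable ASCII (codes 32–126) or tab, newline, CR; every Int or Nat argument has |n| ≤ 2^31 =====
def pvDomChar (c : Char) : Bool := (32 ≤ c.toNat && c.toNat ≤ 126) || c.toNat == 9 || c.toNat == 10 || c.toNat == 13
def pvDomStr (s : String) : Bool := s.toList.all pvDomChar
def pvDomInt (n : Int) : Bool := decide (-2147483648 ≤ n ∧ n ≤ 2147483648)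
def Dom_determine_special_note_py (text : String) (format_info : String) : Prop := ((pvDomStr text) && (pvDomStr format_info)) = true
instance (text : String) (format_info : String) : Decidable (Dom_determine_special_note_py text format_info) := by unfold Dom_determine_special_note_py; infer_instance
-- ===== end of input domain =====

-- B replaces A's flat if/elif cascade by a declarative rule table scanned by one
-- generic first-match-per-group loop (objective: simpler).

-- ===== PORT A =====
-- any(keyword in text_lower for keyword in ks)
def pvAnyIn (t : String) (ks : List String) : Bool := ks.any (fun k => PySem.Str.isIn k t)

def determine_special_note_py (text : String) (format_info : String) : String :=
  let tl := PySem.Str.lower text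
  let notes : List String := []
  let notes := if pvAnyIn tl ["q&a", "q & a", "q and a"] then notes ++ ["Q&A"] else notes
  let notes :=
    if pvAnyIn tl ["with director", "director in person", "director present"] then
      notes ++ ["Director Appearance"]
    else if PySem.Str.isIn "director" tl &&
        (PySem.Str.isIn "appearance" tl || PySem.Str.isIn "intro" tl || PySem.Str.isIn "in person" tl) then
      notes ++ ["Director Appearance"]
    else notes
  let notes :=
    if pvAnyIn tl ["with filmmaker", "filmmaker in person", "filmmaker present"] then
      notes ++ ["Filmmaker Appearance"]
    else if PySem.Str.isIn "filmmaker" tl &&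
        (PySem.Str.isIn "appearance" tl || PySem.Str.isIn "in person" tl) then
      notes ++ ["Filmmaker Appearance"]
    else notes
  let notes :=
    if PySem.Str.isIn "opening night" tl then notes ++ ["Opening Night"]
    else if PySem.Str.isIn "premiere" tl then notes ++ ["Premiere"]
    else notes
  let notes :=
    if pvAnyIn tl ["sneak preview", "sneak peek"] then notes ++ ["Sneak Preview"]
    else if PySem.Str.isIn "advance screening" tl || PySem.Str.isIn "early access" tl then
      notes ++ ["Advance Screening"]
    else notes
  let notes :=
    if PySem.Str.isIn "special presentation" tl || PySem.Str.isIn "special screening" tl then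
      notes ++ ["Special Presentation"]
    else notes
  let notes :=
    if PySem.Str.isIn "fan event" tl || PySem.Str.isIn "fan screening" tl then
      notes ++ ["Fan Event"]
    else notes
  let notes :=
    if PySem.Str.isIn "marathon" tl || PySem.Str.isIn "double feature" tl || PySem.Str.isIn "triple feature" tl then
      notes ++ ["Marathon"]
    else notes
  let notes := if pvAnyIn tl ["anniversary", "th anniversary"] then notes ++ ["Anniversary"] else notes
  PySem.Str.join " | " notes

-- ===== PORT B =====
-- the rule table _RULES: groups of (musts, anys, label) entries
def pvRules : List (List (List String × List String × String)) :=
  [ [([], ["q&a", "q & a", "q and a"], "Q&A")],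
    [([], ["with director", "director in person", "director present"], "Director Appearance"),
     (["director"], ["appearance", "intro", "in person"], "Director Appearance")],
    [([], ["with filmmaker", "filmmaker in person", "filmmaker present"], "Filmmaker Appearance"),
     (["filmmaker"], ["appearance", "in person"], "Filmmaker Appearance")],
    [([], ["opening night"], "Opening Night"),
     ([], ["premiere"], "Premiere")],
    [([], ["sneak preview", "sneak peek"], "Sneak Preview"),
     ([], ["advance screening", "early access"], "Advance Screening")],
    [([], ["special presentation", "special screening"], "Special Presentation")],
    [([], ["fan event", "fan screening"], "Fan Event")],
    [([], ["marathon", "double feature", "triple feature"], "Marathon")],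
    [([], ["anniversary", "th anniversary"], "Anniversary")] ]

-- inner loop: first matching entry of the group yields its label, then break
def pvGroupLabel (t : String) : List (List String × List String × String) → List String
  | [] => []
  | (musts, anys, label) :: rest =>
    if musts.all (fun m => PySem.Str.isIn m t) && anys.any (fun a => PySem.Str.isIn a t) then
      [label]
    else pvGroupLabel t rest

def determine_special_note_py_alt (text : String) (format_info : String) : String :=
  let t := PySem.Str.lower text
  let labels := pvRules.foldl (fun acc g => acc ++ pvGroupLabel t g) []
  PySem.Str.join " | " labels

-- ===== PRECONDITION & SPEC =====
def Spec_determine_special_note_py (text : String) (format_info : String) (out : String) : Prop := out = determine_special_note_py_alt text format_info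
instance (text : String) (format_info : String) (out : String) : Decidable (Spec_determine_special_note_py text format_info out) := by unfold Spec_determine_special_note_py; infer_instance

-- ===== CLAIM (what is proved, stated in full; the proofs are below) =====
def Claim_equal_determine_special_note_py : Prop := ∀ (text : String) (format_info : String), Dom_determine_special_note_py text format_info → Spec_determine_special_note_py text format_info (determine_special_note_py text format_info)

-- ===== LEMMAS AND PROOFS =====

-- pull the accumulator out of A's one-branch append
theorem pvPushIf1 (x u : List String) (c : Bool) :
    (if c then x ++ u else x) = x ++ (if c then u else []) := by
  cases c <;> simp

-- pull the accumulator out of A's if/elif append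
theorem pvPushIf2 (x u v : List String) (a b : Bool) :
    (if a then x ++ u else x ++ (if b then v else []))
      = x ++ (if a then u else if b then v else []) := by
  cases a <;> simp

-- ===== VERDICT (by name: the statement is the Claim_ definition above) =====
theorem determine_special_note_py_spec : Claim_equal_determine_special_note_py := by
  intro text format_info _
  unfold Spec_determine_special_note_py determine_special_note_py determine_special_note_py_alt
  simp only [pvRules, List.foldl_cons, List.foldl_nil, pvPushIf1, pvPushIf2]
  simp only [pvGroupLabel, pvAnyIn, List.any_cons, List.any_nil, List.all_cons, List.all_nil,
    Bool.and_true, Bool.true_and, Bool.or_false, Bool.or_assoc]
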